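-- pv_equiv track=rewrite | github.com/k-harada/AtCoder | ABC/typical90/004.py | solve
-- ===== SOURCE A (Python) =====
-- def solve(h, w, a_array):
--     sum_i = [0] * h
--     sum_j = [0] * w
--     for i in range(h):
--         for j in range(w):
--             sum_i[i] += a_array[i][j]
--             sum_j[j] += a_array[i][j]
--     res = []
--     for i in range(h):
--         res.append(" ".join(str(sum_i[i] + sum_j[j] - a_array[i][j]) for j in range(w)))
--     return res
-- ===== SOURCE B (Python) =====
-- def solve(h, w, a_array):
--     # Brute force: recompute each cell's row sum and column sum directly,
--     # with no precomputed accumulator arrays at all.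
--     return [
--         " ".join(
--             str(sum(a_array[i][jj] for jj in range(w))
--                 + sum(a_array[ii][j] for ii in range(h))
--                 - a_array[i][j])
--             for j in range(w))
--         for i in range(h)]
-- ===== Notes on version B (the rewrite author's own statement) =====
-- stated objective: alternative
-- what changed: Eliminates A's precomputed sum_i/sum_j accumulator arrays and its fused mutating double loop: B recomputes each cell's row sum and column sum directly per cell, trading O(h*w) for a naive O(h*w*(h+w)) direct computation.
import Mathlib
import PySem

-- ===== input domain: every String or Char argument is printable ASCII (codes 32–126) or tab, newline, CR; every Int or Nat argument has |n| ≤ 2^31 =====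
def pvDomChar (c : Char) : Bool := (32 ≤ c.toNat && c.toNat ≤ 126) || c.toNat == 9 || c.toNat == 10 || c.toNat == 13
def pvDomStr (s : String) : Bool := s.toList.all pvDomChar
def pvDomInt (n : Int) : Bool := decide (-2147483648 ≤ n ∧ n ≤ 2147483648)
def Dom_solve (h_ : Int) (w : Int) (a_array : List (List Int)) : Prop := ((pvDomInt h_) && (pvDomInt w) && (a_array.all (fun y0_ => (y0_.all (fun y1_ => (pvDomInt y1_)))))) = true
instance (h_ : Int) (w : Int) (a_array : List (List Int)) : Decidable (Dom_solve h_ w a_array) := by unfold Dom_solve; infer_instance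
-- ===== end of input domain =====

-- B drops A's precomputed sum_i/sum_j accumulator arrays and recomputes each cell's row and
-- column sum directly per cell; objective: alternative (no speed claim).

-- ===== PORT A =====
def solve (h_ : Int) (w : Int) (a_array : List (List Int)) : List String :=
  let sums : List Int × List Int :=
    (PySem.List.pyRange 0 h_ 1).foldl
      (fun (s : List Int × List Int) i =>
        (PySem.List.pyRange 0 w 1).foldl
          (fun (s : List Int × List Int) j =>
            let v := PySem.List.pyGetD (PySem.List.pyGetD a_array i []) j 0
            (PySem.List.pySetD s.1 i (PySem.List.pyGetD s.1 i 0 + v),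
             PySem.List.pySetD s.2 j (PySem.List.pyGetD s.2 j 0 + v)))
          s)
      (List.replicate h_.toNat 0, List.replicate w.toNat 0)
  (PySem.List.pyRange 0 h_ 1).foldl
    (fun res i =>
      res ++ [PySem.Str.join " "
        ((PySem.List.pyRange 0 w 1).map (fun j =>
          PySem.Int.toStr (PySem.List.pyGetD sums.1 i 0 + PySem.List.pyGetD sums.2 j 0
            - PySem.List.pyGetD (PySem.List.pyGetD a_array i []) j 0)))]) []

-- ===== PORT B =====
def solve_alt (h_ : Int) (w : Int) (a_array : List (List Int)) : List String :=
  (PySem.List.pyRange 0 h_ 1).map (fun i =>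
    PySem.Str.join " " ((PySem.List.pyRange 0 w 1).map (fun j =>
      PySem.Int.toStr (
        ((PySem.List.pyRange 0 w 1).map (fun jj =>
          PySem.List.pyGetD (PySem.List.pyGetD a_array i []) jj 0)).sum
        + ((PySem.List.pyRange 0 h_ 1).map (fun ii =>
          PySem.List.pyGetD (PySem.List.pyGetD a_array ii []) j 0)).sum
        - PySem.List.pyGetD (PySem.List.pyGetD a_array i []) j 0))))

-- ===== PRECONDITION & SPEC =====
-- Pre_ excludes exactly the inputs where A raises IndexError: 0 < h and 0 < w with h exceeding
-- the number of rows or some of the first h rows shorter than w.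
def Pre_solve (h_ : Int) (w : Int) (a_array : List (List Int)) : Prop :=
  (0 < h_ ∧ 0 < w) →
    (h_ ≤ (a_array.length : Int) ∧ ∀ row ∈ a_array.take h_.toNat, w ≤ (row.length : Int))
instance (h_ : Int) (w : Int) (a_array : List (List Int)) : Decidable (Pre_solve h_ w a_array) := by
  unfold Pre_solve; infer_instance
def pvWitness_solve : Int × Int × List (List Int) := (2, 2, [[1, 2], [3, 4]])

def Spec_solve (h_ : Int) (w : Int) (a_array : List (List Int)) (out : List String) : Prop :=
  out = solve_alt h_ w a_array
instance (h_ : Int) (w : Int) (a_array : List (List Int)) (out : List String) :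
    Decidable (Spec_solve h_ w a_array out) := by unfold Spec_solve; infer_instance

-- ===== CLAIM (what is proved, stated in full; the proofs are below) =====
def Claim_equal_solve : Prop := ∀ (h_ : Int) (w : Int) (a_array : List (List Int)),
  Dom_solve h_ w a_array → Pre_solve h_ w a_array → Spec_solve h_ w a_array (solve h_ w a_array)

-- ===== LEMMAS AND PROOFS =====

-- the matrix entry a_array[i][j] as both ports see it
def AA (a_array : List (List Int)) (i j : Nat) : Int :=
  (a_array.getD i []).getD j 0

lemma getD_lt {α : Type} (l : List α) (d : α) {n : Nat} (h : n < l.length) :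
    l.getD n d = l[n] := by
  simp [List.getD_eq_getElem?_getD, List.getElem?_eq_getElem h]

lemma pyRange_zero_eq (x : Int) :
    PySem.List.pyRange 0 x 1 = (List.range x.toNat).map (Nat.cast : Nat → Int) := by
  apply List.ext_getElem
  · simp [PySem.List.length_pyRange_one]
  · intro i h1 h2
    rw [PySem.List.getElem_pyRange_one]
    simp only [List.getElem_map, List.getElem_range, zero_add]

lemma getD_map_range' (g : Nat → Int) {n j : Nat} (hj : j < n) :
    ((List.range n).map g).getD j 0 = g j := by
  rw [getD_lt _ 0 (by simpa using hj)]
  simp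

lemma set_getD_self (s : List Int) (i : Nat) (h : i < s.length) :
    s.set i (s.getD i 0) = s := by
  rw [getD_lt s 0 h]
  exact List.set_getElem_self h

lemma map_range_getD {α : Type} (l : List α) (d : α) (n : Nat) (h : n ≤ l.length) :
    (List.range n).map (fun i => l.getD i d) = l.take n := by
  apply List.ext_getElem
  · simp [h]
  · intro i h1 h2
    simp only [List.getElem_map, List.getElem_range, List.getElem_take]
    rw [getD_lt l d (by simp at h1; omega)]

lemma fold_set_same {α : Type} (g : α → Int) :
    ∀ (l : List α) (s : List Int) (i : Nat), i < s.length →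
    l.foldl (fun t x => t.set i (t.getD i 0 + g x)) s = s.set i (s.getD i 0 + (l.map g).sum) := by
  intro l
  induction l with
  | nil => intro s i h; simpa using (set_getD_self s i h).symm
  | cons x xs ih =>
    intro s i h
    have hlen : i < (s.set i (s.getD i 0 + g x)).length := by simpa using h
    rw [List.foldl_cons, ih _ i hlen]
    rw [getD_lt _ 0 hlen, List.getElem_set_self (by simpa using h), List.set_set]
    rw [getD_lt s 0 h]
    simp [add_assoc]

lemma fold_set_range (F : List Int → Nat → List Int) (f : Nat → Int)
    (hF : ∀ t i, i < t.length → F t i = t.set i (t.getD i 0 + f i)) :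
    ∀ (n : Nat) (s : List Int), n ≤ s.length →
    (List.range n).foldl F s = (List.range n).map (fun i => s.getD i 0 + f i) ++ s.drop n := by
  intro n
  induction n with
  | zero => intro s _; simp
  | succ n ih =>
    intro s h
    have hn : n ≤ s.length := by omega
    rw [List.range_succ, List.foldl_append, ih s hn]
    have hul : ((List.range n).map (fun i => s.getD i 0 + f i) ++ s.drop n).length = s.length := by
      simp; omega
    have hnu : n < ((List.range n).map (fun i => s.getD i 0 + f i) ++ s.drop n).length := by omega
    rw [List.foldl_cons, List.foldl_nil, hF _ n hnu]
    have hdrop : s.drop n = s[n] :: s.drop (n + 1) :=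
      (List.getElem_cons_drop (show n < s.length by omega)).symm
    have hml : ((List.range n).map (fun i => s.getD i 0 + f i)).length = n := by simp
    have hgd : ((List.range n).map (fun i => s.getD i 0 + f i) ++ s.drop n).getD n 0 = s[n] := by
      have h1 : ((List.range n).map (fun i => s.getD i 0 + f i) ++ s.drop n)[n]? = some s[n] := by
        rw [List.getElem?_append_right (by omega), hml, hdrop]
        simp
      rw [List.getD_eq_getElem?_getD, h1]
      rfl
    rw [hgd]
    rw [List.set_append_right _ _ (by omega), hml, hdrop, Nat.sub_self, List.set_cons_zero]
    rw [List.map_append, List.append_assoc]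
    congr 1
    simp only [List.map_cons, List.map_nil, List.singleton_append]
    rw [getD_lt s 0 (by omega)]
    rfl

lemma fold_set_distinct (f : Nat → Int) (n : Nat) (s : List Int) (h : n ≤ s.length) :
    (List.range n).foldl (fun t j => t.set j (t.getD j 0 + f j)) s
    = (List.range n).map (fun j => s.getD j 0 + f j) ++ s.drop n :=
  fold_set_range _ f (fun _ _ _ => rfl) n s h

lemma S1_char (A : Nat → Nat → Int) (W : Nat) (n : Nat) (s : List Int) (h : n ≤ s.length) :
    (List.range n).foldl
      (fun s i => (List.range W).foldl (fun t j => t.set i (t.getD i 0 + A i j)) s) s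
    = (List.range n).map (fun i => s.getD i 0 + ((List.range W).map (A i)).sum) ++ s.drop n :=
  fold_set_range _ _ (fun t i hi => fold_set_same (A i) (List.range W) t i hi) n s h

lemma S2_char (A : Nat → Nat → Int) (W : Nat) :
    ∀ (l : List Nat) (t : List Int), t.length = W →
    l.foldl (fun t i => (List.range W).foldl (fun u j => u.set j (u.getD j 0 + A i j)) t) t
    = (List.range W).map (fun j => t.getD j 0 + (l.map (fun i => A i j)).sum) := by
  intro l
  induction l with
  | nil =>
    intro t ht
    simp only [List.foldl_nil, List.map_nil, List.sum_nil, add_zero]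
    rw [← ht, map_range_getD t 0 t.length le_rfl, List.take_length]
  | cons x xs ih =>
    intro t ht
    rw [List.foldl_cons, fold_set_distinct (A x) W t (by omega)]
    rw [show t.drop W = [] from by simp [ht]]
    rw [List.append_nil]
    rw [ih _ (by simp)]
    apply List.map_congr_left
    intro j hj
    simp only [List.mem_range] at hj
    rw [getD_map_range' _ hj]
    simp [add_assoc]

lemma foldl_prod {α β ι : Type} (F : α → ι → α) (G : β → ι → β) :
    ∀ (l : List ι) (a : α) (b : β),
    l.foldl (fun s x => (F s.1 x, G s.2 x)) (a, b) = (l.foldl F a, l.foldl G b) := by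
  intro l
  induction l with
  | nil => intro a b; rfl
  | cons x xs ih => intro a b; simpa using ih (F a x) (G b x)

lemma sums_char (A : Nat → Nat → Int) (H W : Nat) :
    (List.range H).foldl
      (fun (s : List Int × List Int) i =>
        (List.range W).foldl
          (fun s j => (s.1.set i (s.1.getD i 0 + A i j), s.2.set j (s.2.getD j 0 + A i j))) s)
      (List.replicate H 0, List.replicate W 0)
    = ((List.range H).map (fun i => ((List.range W).map (A i)).sum),
       (List.range W).map (fun j => ((List.range H).map (fun i => A i j)).sum)) := by
  have hsplit : (fun (s : List Int × List Int) (i : Nat) =>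
      (List.range W).foldl
        (fun s j => (s.1.set i (s.1.getD i 0 + A i j), s.2.set j (s.2.getD j 0 + A i j))) s)
      = fun s i =>
        ((List.range W).foldl (fun t j => t.set i (t.getD i 0 + A i j)) s.1,
         (List.range W).foldl (fun u j => u.set j (u.getD j 0 + A i j)) s.2) := by
    funext s i
    obtain ⟨a, b⟩ := s
    exact foldl_prod (fun t j => t.set i (t.getD i 0 + A i j))
      (fun u j => u.set j (u.getD j 0 + A i j)) (List.range W) a b
  have h2 := foldl_prod
    (fun (t : List Int) (i : Nat) => (List.range W).foldl (fun t j => t.set i (t.getD i 0 + A i j)) t)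
    (fun (u : List Int) (i : Nat) => (List.range W).foldl (fun u j => u.set j (u.getD j 0 + A i j)) u)
    (List.range H) (List.replicate H 0) (List.replicate W 0)
  rw [hsplit, h2]
  refine Prod.ext ?_ ?_
  · rw [S1_char A W H (List.replicate H 0) (by simp)]
    simp only [List.drop_replicate, Nat.sub_self, List.replicate_zero, List.append_nil]
    apply List.map_congr_left
    intro i hi
    simp only [List.mem_range] at hi
    rw [getD_lt _ 0 (by simpa using hi)]
    simp
  · rw [S2_char A W (List.range H) (List.replicate W 0) (by simp)]
    apply List.map_congr_left
    intro j hj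
    simp only [List.mem_range] at hj
    rw [getD_lt _ 0 (by simpa using hj)]
    simp

lemma solve_norm (h_ w : Int) (a : List (List Int)) :
    solve h_ w a = (List.range h_.toNat).map (fun i =>
      PySem.Str.join " " ((List.range w.toNat).map (fun j =>
        PySem.Int.toStr (
          ((List.range w.toNat).map (AA a i)).sum
          + ((List.range h_.toNat).map (fun i' => AA a i' j)).sum
          - AA a i j)))) := by
  unfold solve
  rw [pyRange_zero_eq h_, pyRange_zero_eq w]
  simp only [List.foldl_map, PySem.List.pySetD_natCast, PySem.List.pyGetD_natCast]
  have hs := sums_char (AA a) h_.toNat w.toNat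
  simp only [AA] at hs
  rw [hs]
  rw [PySem.List.foldl_append_singleton_eq_map]
  simp only [List.nil_append, List.map_map, Function.comp_def]
  apply List.map_congr_left
  intro i hi
  simp only [List.mem_range] at hi
  congr 1
  apply List.map_congr_left
  intro j hj
  simp only [List.mem_range] at hj
  simp only [PySem.List.pyGetD_natCast]
  rw [getD_map_range' _ hi, getD_map_range' _ hj]
  simp [AA]

lemma solve_alt_norm (h_ w : Int) (a : List (List Int)) :
    solve_alt h_ w a = (List.range h_.toNat).map (fun i =>
      PySem.Str.join " " ((List.range w.toNat).map (fun j =>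
        PySem.Int.toStr (
          ((List.range w.toNat).map (AA a i)).sum
          + ((List.range h_.toNat).map (fun i' => AA a i' j)).sum
          - AA a i j)))) := by
  unfold solve_alt
  rw [pyRange_zero_eq h_, pyRange_zero_eq w]
  simp only [List.map_map, Function.comp_def, PySem.List.pyGetD_natCast]
  rfl

-- ===== VERDICT (by name: the statement is the Claim_ definition above) =====
theorem solve_spec : Claim_equal_solve := by
  unfold Claim_equal_solve
  intro h_ w a _dom _pre
  unfold Spec_solve
  rw [solve_norm, solve_alt_norm]
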